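-- pv_equiv track=rewrite | github.com/Devashish-Mishra-2003/job_sync | utils.py | parse_name_email_from_text
-- ===== SOURCE A (Python) =====
-- def parse_name_email_from_text(text):
--     lines = text.splitlines(); name=''; email=''
--     for l in lines[:8]:
--         if '@' in l and '.' in l:
--             parts = l.strip().split()
--             for p in parts:
--                 if '@' in p and '.' in p: email=p; break
--         elif len(l.strip().split())<=4 and len(l.strip())>2 and name=='' and '@' not in l:
--             name = l.strip()
--     return name, email
-- ===== SOURCE B (Python) =====
-- def parse_name_email_from_text(text):
--     def go(ls):
--         # returns (Optional name, Optional email) for this suffix of lines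
--         if not ls:
--             return None, None
--         n, e = go(ls[1:])
--         l = ls[0]
--         if '@' in l and '.' in l:
--             my_n = None
--             my_e = next((p for p in l.strip().split() if '@' in p and '.' in p), None)
--         else:
--             my_e = None
--             if '@' not in l and len(l.strip()) > 2 and len(l.strip().split()) <= 4:
--                 my_n = l.strip()
--             else:
--                 my_n = None
--         # name: earliest wins; email: latest wins
--         return (my_n if my_n is not None else n), (e if e is not None else my_e)
--     n, e = go(text.splitlines()[:8])
--     return (n if n is not None else '', e if e is not None else '')
-- ===== Notes on version B (the rewrite author's own statement) =====
-- stated objective: alternative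
-- what changed: A's forward loop threading mutable (name, email) state is replaced by a structural recursion over the first-8-line list that combines each line's optional name/email with the recursive result of the tail (earliest line wins the name slot, latest wins the email slot), no state threaded.
import Mathlib
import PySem

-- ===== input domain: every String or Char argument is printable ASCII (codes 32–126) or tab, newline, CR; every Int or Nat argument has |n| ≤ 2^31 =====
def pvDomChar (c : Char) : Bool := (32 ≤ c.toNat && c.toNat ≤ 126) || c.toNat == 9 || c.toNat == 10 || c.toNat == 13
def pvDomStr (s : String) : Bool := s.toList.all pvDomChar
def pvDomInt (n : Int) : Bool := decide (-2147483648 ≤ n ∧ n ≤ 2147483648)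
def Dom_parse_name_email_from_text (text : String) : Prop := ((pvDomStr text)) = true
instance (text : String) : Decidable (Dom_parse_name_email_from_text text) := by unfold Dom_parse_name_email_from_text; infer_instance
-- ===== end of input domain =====

-- B replaces A's forward loop over mutable (name, email) state by a structural
-- recursion over the line list that builds optional results back-to-front
-- (objective: alternative; same cost).

-- ===== PORT A =====

-- A's inner 'for p in parts: if '@' in p and '.' in p: email=p; break'
def pvFirstTokA : List String → Option String
  | [] => none
  | p :: rest =>
      if PySem.Str.isIn "@" p && PySem.Str.isIn "." p then some p else pvFirstTokA rest

-- the body of A's 'for l in lines[:8]' loop, state = (name, email)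
def pvStepA (st : String × String) (l : String) : String × String :=
  if PySem.Str.isIn "@" l && PySem.Str.isIn "." l then
    let parts := PySem.Str.split₀ (PySem.Str.strip l)
    match pvFirstTokA parts with
    | some p => (st.1, p)
    | none => st
  else if decide ((PySem.Str.split₀ (PySem.Str.strip l)).length ≤ 4)
          && decide (2 < PySem.Str.len (PySem.Str.strip l))
          && decide (st.1 = "")
          && !PySem.Str.isIn "@" l then
    (PySem.Str.strip l, st.2)
  else st

def parse_name_email_from_text (text : String) : String × String :=
  let lines := PySem.Str.splitlines text
  (PySem.List.slice lines none (some 8)).foldl pvStepA ("", "")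

-- ===== PORT B =====

-- Source B's recursive 'go': (optional name, optional email) for a suffix of lines;
-- earliest line wins the name slot, latest line wins the email slot.
def pvGoB : List String → Option String × Option String
  | [] => (none, none)
  | l :: rest =>
      let ne := pvGoB rest
      if PySem.Str.isIn "@" l && PySem.Str.isIn "." l then
        let my_e := (PySem.Str.split₀ (PySem.Str.strip l)).find?
          (fun p => PySem.Str.isIn "@" p && PySem.Str.isIn "." p)
        (ne.1, match ne.2 with | some e => some e | none => my_e)
      else
        let my_n :=
          if !PySem.Str.isIn "@" l
              && decide (2 < PySem.Str.len (PySem.Str.strip l))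
              && decide ((PySem.Str.split₀ (PySem.Str.strip l)).length ≤ 4) then
            some (PySem.Str.strip l)
          else none
        ((match my_n with | some x => some x | none => ne.1), ne.2)

def parse_name_email_from_text_alt (text : String) : String × String :=
  let ne := pvGoB (PySem.List.slice (PySem.Str.splitlines text) none (some 8))
  (ne.1.getD "", ne.2.getD "")

-- ===== PRECONDITION & SPEC =====
def Spec_parse_name_email_from_text (text : String) (out : String × String) : Prop := out = parse_name_email_from_text_alt text
instance (text : String) (out : String × String) : Decidable (Spec_parse_name_email_from_text text out) := by unfold Spec_parse_name_email_from_text; infer_instance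

-- ===== CLAIM (what is proved, stated in full; the proofs are below) =====
def Claim_equal_parse_name_email_from_text : Prop := ∀ (text : String), Dom_parse_name_email_from_text text → Spec_parse_name_email_from_text text (parse_name_email_from_text text)

-- ===== LEMMAS AND PROOFS =====

theorem pvFirstTokA_eq_find? (xs : List String) :
    pvFirstTokA xs = xs.find? (fun p => PySem.Str.isIn "@" p && PySem.Str.isIn "." p) := by
  induction xs with
  | nil => rfl
  | cons p rest ih =>
      simp only [pvFirstTokA, List.find?, ih]
      cases h1 : PySem.Chars.isIn ['@'] p.toList <;>
        cases h2 : PySem.Chars.isIn ['.'] p.toList <;> simp [h1, h2]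

theorem pvStrip_ne_empty (l : String) (h : 2 < PySem.Str.len (PySem.Str.strip l)) :
    PySem.Str.strip l ≠ "" := by
  intro he
  rw [he] at h
  exact absurd h (by decide)

-- the A-side name-branch condition, abbreviated for the case lemmas below
theorem pvStepA_email_some {l p : String} (n e : String)
    (hm : (PySem.Str.isIn "@" l && PySem.Str.isIn "." l) = true)
    (hf : pvFirstTokA (PySem.Str.split₀ (PySem.Str.strip l)) = some p) :
    pvStepA (n, e) l = (n, p) := by
  unfold pvStepA; rw [if_pos hm]; simp only [hf]

theorem pvStepA_email_none {l : String} (n e : String)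
    (hm : (PySem.Str.isIn "@" l && PySem.Str.isIn "." l) = true)
    (hf : pvFirstTokA (PySem.Str.split₀ (PySem.Str.strip l)) = none) :
    pvStepA (n, e) l = (n, e) := by
  unfold pvStepA; rw [if_pos hm]; simp only [hf]

theorem pvStepA_other {l : String} (n e : String)
    (hm : (PySem.Str.isIn "@" l && PySem.Str.isIn "." l) = false)
    (hc : (decide ((PySem.Str.split₀ (PySem.Str.strip l)).length ≤ 4)
          && decide (2 < PySem.Str.len (PySem.Str.strip l))
          && decide (n = "")
          && !PySem.Str.isIn "@" l) = false) :
    pvStepA (n, e) l = (n, e) := by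
  unfold pvStepA; rw [if_neg (by intro h; rw [hm] at h; exact absurd h (by decide)), if_neg (by intro h; rw [hc] at h; exact absurd h (by decide))]

theorem pvStepA_name {l : String} (n e : String)
    (hm : (PySem.Str.isIn "@" l && PySem.Str.isIn "." l) = false)
    (hc : (decide ((PySem.Str.split₀ (PySem.Str.strip l)).length ≤ 4)
          && decide (2 < PySem.Str.len (PySem.Str.strip l))
          && decide (n = "")
          && !PySem.Str.isIn "@" l) = true) :
    pvStepA (n, e) l = (PySem.Str.strip l, e) := by
  unfold pvStepA; rw [if_neg (by intro h; rw [hm] at h; exact absurd h (by decide)), if_pos hc]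

theorem pvGoB_email {l : String} (rest : List String)
    (hm : (PySem.Str.isIn "@" l && PySem.Str.isIn "." l) = true) :
    pvGoB (l :: rest) =
      ((pvGoB rest).1,
        match (pvGoB rest).2 with
        | some e => some e
        | none => (PySem.Str.split₀ (PySem.Str.strip l)).find?
            (fun p => PySem.Str.isIn "@" p && PySem.Str.isIn "." p)) := by
  conv_lhs => rw [pvGoB]
  rw [if_pos hm]

theorem pvGoB_other {l : String} (rest : List String)
    (hm : (PySem.Str.isIn "@" l && PySem.Str.isIn "." l) = false) :
    pvGoB (l :: rest) =
      ((match (if !PySem.Str.isIn "@" l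
              && decide (2 < PySem.Str.len (PySem.Str.strip l))
              && decide ((PySem.Str.split₀ (PySem.Str.strip l)).length ≤ 4) then
            some (PySem.Str.strip l)
          else none) with
        | some x => some x
        | none => (pvGoB rest).1), (pvGoB rest).2) := by
  conv_lhs => rw [pvGoB]
  rw [if_neg (by intro h; rw [hm] at h; exact absurd h (by decide))]

-- the loop/recursion correspondence: folding A's step from state (n, e) over L
-- yields B's back-to-front optional results, resolved against n and e.
set_option maxHeartbeats 1000000 in
theorem pvFoldA (L : List String) (n e : String) :
    L.foldl pvStepA (n, e) =
      ( if n = "" then ((pvGoB L).1).getD n else n,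
        ((pvGoB L).2).getD e ) := by
  induction L generalizing n e with
  | nil => simp [pvGoB]
  | cons l rest ih =>
      rw [List.foldl_cons]
      by_cases hm : (PySem.Str.isIn "@" l && PySem.Str.isIn "." l) = true
      · rw [pvGoB_email rest hm]
        cases hf : pvFirstTokA (PySem.Str.split₀ (PySem.Str.strip l)) with
        | some p =>
            rw [pvStepA_email_some n e hm hf, ih]
            rw [pvFirstTokA_eq_find?] at hf
            cases h2 : (pvGoB rest).2 <;>
              simp only [hf, Option.getD_some, Option.getD_none]
        | none =>
            rw [pvStepA_email_none n e hm hf, ih]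
            rw [pvFirstTokA_eq_find?] at hf
            cases h2 : (pvGoB rest).2 <;>
              simp only [hf, Option.getD_some, Option.getD_none]
      · rw [Bool.not_eq_true] at hm
        rw [pvGoB_other rest hm]
        by_cases hok : (!PySem.Str.isIn "@" l
              && decide (2 < PySem.Str.len (PySem.Str.strip l))
              && decide ((PySem.Str.split₀ (PySem.Str.strip l)).length ≤ 4)) = true
        · have h2 : 2 < PySem.Str.len (PySem.Str.strip l) := by
            simp only [Bool.and_eq_true, decide_eq_true_eq] at hok; exact hok.1.2
          have hne := pvStrip_ne_empty l h2
          by_cases hn : n = ""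
          · subst hn
            have hc : (decide ((PySem.Str.split₀ (PySem.Str.strip l)).length ≤ 4)
                && decide (2 < PySem.Str.len (PySem.Str.strip l))
                && decide (("" : String) = "")
                && !PySem.Str.isIn "@" l) = true := by
              simp only [Bool.and_eq_true, decide_eq_true_eq] at hok ⊢
              exact ⟨⟨⟨hok.2, hok.1.2⟩, trivial⟩, hok.1.1⟩
            rw [pvStepA_name "" e hm hc, ih, hok, if_neg hne, if_pos rfl]
            rfl
          · have hd : decide (n = "") = false := by simp [hn]
            have hc : (decide ((PySem.Str.split₀ (PySem.Str.strip l)).length ≤ 4)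
                && decide (2 < PySem.Str.len (PySem.Str.strip l))
                && decide (n = "")
                && !PySem.Str.isIn "@" l) = false := by
              rw [hd]; simp only [Bool.and_false, Bool.false_and]
            rw [pvStepA_other n e hm hc, ih, if_neg hn, if_neg hn]
        · rw [Bool.not_eq_true] at hok
          have hc : (decide ((PySem.Str.split₀ (PySem.Str.strip l)).length ≤ 4)
              && decide (2 < PySem.Str.len (PySem.Str.strip l))
              && decide (n = "")
              && !PySem.Str.isIn "@" l) = false := by
            simp only [Bool.and_eq_false_iff]
            rcases Bool.and_eq_false_iff.mp hok with h | h
            · rcases Bool.and_eq_false_iff.mp h with h' | h'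
              · right; exact h'
              · left; left; right; exact h'
            · left; left; left; exact h
          rw [pvStepA_other n e hm hc, ih, hok]
          rfl

-- ===== VERDICT (by name: the statement is the Claim_ definition above) =====
theorem parse_name_email_from_text_spec : Claim_equal_parse_name_email_from_text := by
  intro text _
  unfold Spec_parse_name_email_from_text parse_name_email_from_text parse_name_email_from_text_alt
  simp [pvFoldA]
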